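-- pv_equiv track=rewrite | github.com/nichyow/covid-classifier | utils.py | classify_variant
-- ===== SOURCE A (Python) =====
-- def count_matching_mutations(mutations_list_patient, mutations_list_variant_profile):
--     """
--     Count how many mutation events from patient list appear in variant profile list.
--     Uses tuple(sorted(dict.items())) as signature for comparison.
--     """
--     def sig(m):
--         return tuple(sorted(m.items()))
--     patient_sigs = {sig(m) for m in mutations_list_patient}
--     variant_sigs = {sig(m) for m in mutations_list_variant_profile}
--     return len(patient_sigs & variant_sigs)
--
-- def classify_variant(patient_mutations, variant_profiles, wuhan_like_threshold=3):
--     """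
--     Given patient mutation list and dict of variant->mutation_list,
--     return (identified_variant, match_count).
--     Applies threshold: if no patient mutations -> 'Wuhan-like';
--     if max matches < threshold -> 'Wuhan-like/Unknown'; else select best or tie.
--     """
--     if not patient_mutations:
--         return ("Wuhan-like (No mutations)", 0)
--     scores = {var: count_matching_mutations(patient_mutations, profile)
--               for var, profile in variant_profiles.items()}
--     best_var = max(scores, key=scores.get)
--     best_score = scores[best_var]
--     if best_score < wuhan_like_threshold:
--         return ("Wuhan-like or Other (Low match)", best_score)
--     ties = [var for var, sc in scores.items() if sc == best_score]
--     if len(ties) > 1: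
--         return (" or ".join(ties) + " (tie)", best_score)
--     return (best_var, best_score)
-- ===== SOURCE B (Python) =====
-- def classify_variant(patient_mutations, variant_profiles, wuhan_like_threshold=3):
--     if not patient_mutations:
--         return ("Wuhan-like (No mutations)", 0)
--     if not variant_profiles:
--         raise ValueError("variant_profiles is empty")
--     # Inverted index: mutation signature -> variants whose profile contains it.
--     index = {}
--     for var, profile in variant_profiles.items():
--         for m in profile:
--             sig = tuple(sorted(m.items()))
--             vars_for_sig = index.setdefault(sig, [])
--             if var not in vars_for_sig:
--                 vars_for_sig.append(var)
--     # Stream the distinct patient signatures once, bumping each indexed variant.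
--     counts = {var: 0 for var in variant_profiles}
--     for sig in {tuple(sorted(m.items())) for m in patient_mutations}:
--         for var in index.get(sig, ()):
--             counts[var] += 1
--     # Single pass to pick the best score and collect ties in insertion order.
--     best_score = -1
--     ties = []
--     for var, sc in counts.items():
--         if sc > best_score:
--             best_score, ties = sc, [var]
--         elif sc == best_score:
--             ties.append(var)
--     if best_score < wuhan_like_threshold:
--         return ("Wuhan-like or Other (Low match)", best_score)
--     if len(ties) > 1:
--         return (" or ".join(ties) + " (tie)", best_score)
--     return (ties[0], best_score)
-- ===== Notes on version B (the rewrite author's own statement) =====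
-- stated objective: faster
-- what changed: Replaces A's per-variant signature-set intersections (which rebuild the patient signature set for every variant) plus max(key=scores.get) plus a separate ties filter by an inverted index (signature -> variants) built once from the profiles, one streaming pass over the distinct patient signatures incrementing per-variant counters, and one selection pass maintaining best_score and the ties list.
import Mathlib
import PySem

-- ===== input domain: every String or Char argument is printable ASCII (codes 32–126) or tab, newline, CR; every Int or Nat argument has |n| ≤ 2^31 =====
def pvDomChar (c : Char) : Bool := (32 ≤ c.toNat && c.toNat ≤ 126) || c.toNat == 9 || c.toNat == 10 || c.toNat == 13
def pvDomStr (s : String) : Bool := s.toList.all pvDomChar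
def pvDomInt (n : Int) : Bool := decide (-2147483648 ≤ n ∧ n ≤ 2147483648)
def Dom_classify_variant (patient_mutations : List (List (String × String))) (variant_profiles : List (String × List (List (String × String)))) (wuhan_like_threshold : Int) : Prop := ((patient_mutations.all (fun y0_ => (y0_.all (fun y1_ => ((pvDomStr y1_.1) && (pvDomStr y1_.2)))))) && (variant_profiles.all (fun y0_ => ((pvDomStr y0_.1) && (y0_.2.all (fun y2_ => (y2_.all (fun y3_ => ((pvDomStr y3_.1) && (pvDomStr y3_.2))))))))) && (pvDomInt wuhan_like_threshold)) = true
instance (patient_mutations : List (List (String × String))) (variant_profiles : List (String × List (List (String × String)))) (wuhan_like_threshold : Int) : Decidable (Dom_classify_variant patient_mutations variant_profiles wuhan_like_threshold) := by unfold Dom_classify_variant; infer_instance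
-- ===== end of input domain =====

-- B replaces A's per-variant signature-set intersections + scores dict + max(key=scores.get) + ties
-- filter by an inverted index (signature -> variants) built once from the profiles, one streaming pass
-- over the distinct patient signatures incrementing per-variant counters, and one selection pass
-- maintaining (best_score, ties); same return value (objective: faster, measured).

-- ===== PORT A =====
-- sig(m) = tuple(sorted(m.items())): normalise the mutation dict, sort its items (tuple order)
def mutSigA (m : List (String × String)) : List (String × String) :=
  PySem.List.sorted2 (PySem.Dict.ofList m).items (fun p => p.1) (fun p => p.2) false

def count_matching_mutations (mlp mlv : List (List (String × String))) : Int :=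
  let patient_sigs := PySem.Set.ofList (mlp.map mutSigA)
  let variant_sigs := PySem.Set.ofList (mlv.map mutSigA)
  PySem.Set.len (PySem.Set.inter patient_sigs variant_sigs)

def classify_variant (patient_mutations : List (List (String × String))) (variant_profiles : List (String × List (List (String × String)))) (wuhan_like_threshold : Int) : String × Int :=
  if patient_mutations = [] then ("Wuhan-like (No mutations)", 0)
  else
    -- scores = {var: count_matching_mutations(...) for var, profile in variant_profiles.items()}
    let scores : PySem.Dict String Int :=
      (PySem.Dict.ofList variant_profiles).items.foldl
        (fun d p => d.insert p.1 (count_matching_mutations patient_mutations p.2)) PySem.Dict.empty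
    match PySem.List.max? scores.keys (fun k => scores.getD k 0) with
    | none => ("", 0)   -- max() of an empty dict raises ValueError: excluded by Pre_
    | some best_var =>
      let best_score := scores.getD best_var 0
      if best_score < wuhan_like_threshold then ("Wuhan-like or Other (Low match)", best_score)
      else
        let ties := (scores.items.filter (fun p => p.2 == best_score)).map (fun p => p.1)
        if 1 < (ties.length : Int) then
          (String.ofList ((PySem.Str.join " or " ties).toList ++ " (tie)".toList), best_score)
        else (best_var, best_score)

-- ===== PORT B =====
def mutSigB (m : List (String × String)) : List (String × String) :=
  PySem.List.sorted2 (PySem.Dict.ofList m).items (fun p => p.1) (fun p => p.2) false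

-- index.setdefault(sig, []) followed by the in-place conditional append is exactly
-- index[sig] = f(index.get(sig, [])), i.e. Dict.modify (key appended at the end when new)
def pvIdxAdd (var : String) (idx : PySem.Dict (List (String × String)) (List String)) (m : List (String × String)) : PySem.Dict (List (String × String)) (List String) :=
  idx.modify (mutSigB m) [] (fun vs => if vs.contains var then vs else vs ++ [var])

def classify_variant_alt (patient_mutations : List (List (String × String))) (variant_profiles : List (String × List (List (String × String)))) (wuhan_like_threshold : Int) : String × Int :=
  if patient_mutations = [] then ("Wuhan-like (No mutations)", 0)
  else if variant_profiles = [] then ("", 0)   -- Source B raises ValueError here: excluded by Pre_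
  else
    let L := (PySem.Dict.ofList variant_profiles).items
    let index := L.foldl (fun idx p => p.2.foldl (pvIdxAdd p.1) idx) PySem.Dict.empty
    let counts0 := L.foldl (fun d p => d.insert p.1 (0 : Int)) PySem.Dict.empty
    -- counts[var] += 1: var is always a key of counts, so this is Dict.modify with default 0;
    -- iterating the patient-signature set is order-insensitive (commutative increments)
    let counts := (PySem.Set.ofList (patient_mutations.map mutSigB)).foldl
        (fun d s => (index.getD s []).foldl (fun d v => d.modify v 0 (· + 1)) d) counts0
    let r := counts.items.foldl
        (fun (acc : Int × List String) q =>
          if acc.1 < q.2 then (q.2, [q.1])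
          else if q.2 = acc.1 then (acc.1, acc.2 ++ [q.1]) else acc) (-1, [])
    if r.1 < wuhan_like_threshold then ("Wuhan-like or Other (Low match)", r.1)
    else if 1 < (r.2.length : Int) then
      (String.ofList ((PySem.Str.join " or " r.2).toList ++ " (tie)".toList), r.1)
    else (r.2.headD "", r.1)

-- ===== PRECONDITION & SPEC =====
-- Pre_ excludes only inputs where both programs raise ValueError: a nonempty patient list with an
-- empty variant_profiles dict (A's max() of an empty dict; B's explicit raise).
def Pre_classify_variant (patient_mutations : List (List (String × String))) (variant_profiles : List (String × List (List (String × String)))) (wuhan_like_threshold : Int) : Prop :=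
  patient_mutations = [] ∨ variant_profiles ≠ []
instance (patient_mutations : List (List (String × String))) (variant_profiles : List (String × List (List (String × String)))) (wuhan_like_threshold : Int) : Decidable (Pre_classify_variant patient_mutations variant_profiles wuhan_like_threshold) := by unfold Pre_classify_variant; infer_instance

def pvWitness_classify_variant : (List (List (String × String))) × (List (String × List (List (String × String)))) × Int :=
  ([[("S:N501Y", "present")]], [("Alpha", [[("S:N501Y", "present")]])], 3)

def Spec_classify_variant (patient_mutations : List (List (String × String))) (variant_profiles : List (String × List (List (String × String)))) (wuhan_like_threshold : Int) (out : String × Int) : Prop := out = classify_variant_alt patient_mutations variant_profiles wuhan_like_threshold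
instance (patient_mutations : List (List (String × String))) (variant_profiles : List (String × List (List (String × String)))) (wuhan_like_threshold : Int) (out : String × Int) : Decidable (Spec_classify_variant patient_mutations variant_profiles wuhan_like_threshold out) := by unfold Spec_classify_variant; infer_instance

-- ===== CLAIM (what is proved, stated in full; the proofs are below) =====
def Claim_equal_classify_variant : Prop := ∀ (patient_mutations : List (List (String × String))) (variant_profiles : List (String × List (List (String × String)))) (wuhan_like_threshold : Int), Dom_classify_variant patient_mutations variant_profiles wuhan_like_threshold → Pre_classify_variant patient_mutations variant_profiles wuhan_like_threshold → Spec_classify_variant patient_mutations variant_profiles wuhan_like_threshold (classify_variant patient_mutations variant_profiles wuhan_like_threshold)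

-- ===== LEMMAS AND PROOFS =====

-- running maximum of the second components, started at b
def pvMx (S : List (String × Int)) (b : Int) : Int := S.foldl (fun a q => max a q.2) b

-- Python's scores.get k (0 as the impossible default)
def pvLookup (S : List (String × Int)) (k : String) : Int :=
  ((S.find? (fun q => q.1 == k)).map (fun q => q.2)).getD 0

theorem pvMx_le (S : List (String × Int)) : ∀ b : Int, b ≤ pvMx S b := by
  induction S with
  | nil => intro b; exact le_refl b
  | cons q T ih =>
    intro b
    exact le_trans (le_max_left _ _) (ih (max b q.2))

theorem pvMx_mem (S : List (String × Int)) : ∀ b : Int, pvMx S b = b ∨ ∃ q ∈ S, q.2 = pvMx S b := by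
  induction S with
  | nil => intro b; exact Or.inl rfl
  | cons q T ih =>
    intro b
    have hx : pvMx (q :: T) b = pvMx T (max b q.2) := rfl
    rcases ih (max b q.2) with h | ⟨p, hp, hpv⟩
    · by_cases hb : max b q.2 = b
      · exact Or.inl (by rw [hx, h, hb])
      · refine Or.inr ⟨q, List.mem_cons_self, ?_⟩
        rw [hx, h]
        omega
    · exact Or.inr ⟨p, List.mem_cons_of_mem _ hp, by rw [hx]; exact hpv⟩

theorem pvMx_ge_mem (S : List (String × Int)) : ∀ q ∈ S, ∀ b : Int, q.2 ≤ pvMx S b := by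
  induction S with
  | nil => intro q hq; cases hq
  | cons p T ih =>
    intro q hq b
    have hx : pvMx (p :: T) b = pvMx T (max b p.2) := rfl
    rcases List.mem_cons.mp hq with rfl | hq'
    · rw [hx]; exact le_trans (le_max_right _ _) (pvMx_le T _)
    · rw [hx]; exact ih q hq' _

-- the B-side selection fold, characterised
theorem fold_fst (S : List (String × Int)) : ∀ (b : Int) (ts : List String),
    (S.foldl (fun acc q => if acc.1 < q.2 then (q.2, [q.1]) else if q.2 = acc.1 then (acc.1, acc.2 ++ [q.1]) else acc) (b, ts)).1 = pvMx S b := by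
  induction S with
  | nil => intro b ts; rfl
  | cons q T ih =>
    intro b ts
    have hx : pvMx (q :: T) b = pvMx T (max b q.2) := rfl
    rw [List.foldl_cons, hx]
    by_cases h1 : b < q.2
    · simp only [if_pos h1]
      rw [ih q.2 [q.1]]
      congr 1
      omega
    · simp only [if_neg h1]
      by_cases h2 : q.2 = b
      · simp only [if_pos h2]
        rw [ih b (ts ++ [q.1])]
        congr 1
        omega
      · simp only [if_neg h2]
        rw [ih b ts]
        congr 1
        omega

theorem fold_snd (S : List (String × Int)) : ∀ (b : Int) (ts : List String),
    (S.foldl (fun acc q => if acc.1 < q.2 then (q.2, [q.1]) else if q.2 = acc.1 then (acc.1, acc.2 ++ [q.1]) else acc) (b, ts)).2 =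
      (if b = pvMx S b then ts else []) ++ (S.filter (fun q => q.2 = pvMx S b)).map (fun q => q.1) := by
  induction S with
  | nil => intro b ts; simp [pvMx]
  | cons q T ih =>
    intro b ts
    have hx : pvMx (q :: T) b = pvMx T (max b q.2) := rfl
    have hle : max b q.2 ≤ pvMx T (max b q.2) := pvMx_le T _
    rw [List.foldl_cons, hx]
    by_cases h1 : b < q.2
    · simp only [if_pos h1]
      have hmax : max b q.2 = q.2 := by omega
      rw [ih q.2 [q.1], hmax]
      have hbne : ¬ b = pvMx T q.2 := by rw [hmax] at hle; omega
      rw [if_neg hbne, List.filter_cons]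
      generalize pvMx T q.2 = M at *
      split_ifs with hA hB hB <;> simp_all
    · simp only [if_neg h1]
      have hmax : max b q.2 = b := by omega
      rw [hmax] at hle
      by_cases h2 : q.2 = b
      · simp only [if_pos h2]
        rw [ih b (ts ++ [q.1]), hmax, List.filter_cons]
        generalize pvMx T b = M at *
        split_ifs with hA hB hB <;> simp_all
      · simp only [if_neg h2]
        rw [ih b ts, hmax, List.filter_cons]
        have hq : (decide (q.2 = pvMx T b)) = false := by simp; omega
        rw [hq]
        simp

theorem pvLookup_eq (S : List (String × Int)) (hn : (S.map Prod.fst).Nodup) :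
    ∀ q ∈ S, pvLookup S q.1 = q.2 := by
  induction S with
  | nil => intro q hq; cases hq
  | cons p T ih =>
    rw [List.map_cons, List.nodup_cons] at hn
    intro q hq
    rcases List.mem_cons.mp hq with rfl | hq2
    · simp [pvLookup]
    · have hne : (p.1 == q.1) = false := by
        have hm : q.1 ∈ T.map Prod.fst := List.mem_map_of_mem hq2
        have : p.1 ≠ q.1 := fun h => hn.1 (h ▸ hm)
        simpa using this
      unfold pvLookup
      rw [List.find?_cons, hne]
      exact ih hn.2 q hq2

-- membership in the conditional-append update
theorem upd_mem (vs : List String) (var v : String) :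
    v ∈ (if vs.contains var then vs else vs ++ [var]) ↔ v ∈ vs ∨ v = var := by
  split_ifs with h
  · simp only [List.contains_iff_mem] at h
    constructor
    · exact Or.inl
    · rintro (hv | rfl) <;> [exact hv; exact h]
  · simp

-- the inner index loop (one variant's profile), characterised
theorem idx_inner (var : String) (ms : List (List (String × String))) :
    ∀ (idx : PySem.Dict (List (String × String)) (List String)) (s : List (String × String)) (v : String),
      v ∈ ((ms.foldl (pvIdxAdd var) idx).getD s []) ↔
        v ∈ idx.getD s [] ∨ (v = var ∧ s ∈ ms.map mutSigB) := by
  induction ms with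
  | nil => intro idx s v; simp
  | cons m ms ih =>
    intro idx s v
    rw [List.foldl_cons, ih]
    show v ∈ (idx.modify (mutSigB m) [] _).getD s [] ∨ _ ↔ _
    rw [PySem.Dict.getD_modify]
    by_cases hs : s = mutSigB m
    · rw [if_pos hs, upd_mem]
      simp [hs]
      tauto
    · rw [if_neg hs]
      simp only [List.map_cons, List.mem_cons]
      tauto

-- the whole index-building loop, characterised
theorem idx_outer (L : List (String × List (List (String × String)))) :
    ∀ (idx : PySem.Dict (List (String × String)) (List String)) (s : List (String × String)) (v : String),
      v ∈ ((L.foldl (fun idx p => p.2.foldl (pvIdxAdd p.1) idx) idx).getD s []) ↔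
        v ∈ idx.getD s [] ∨ ∃ p ∈ L, p.1 = v ∧ s ∈ p.2.map mutSigB := by
  induction L with
  | nil => intro idx s v; simp
  | cons q L ih =>
    intro idx s v
    rw [List.foldl_cons, ih, idx_inner]
    constructor
    · rintro ((h | ⟨rfl, hs⟩) | ⟨p, hp, h1, h2⟩)
      · exact Or.inl h
      · exact Or.inr ⟨q, List.mem_cons_self, rfl, hs⟩
      · exact Or.inr ⟨p, List.mem_cons_of_mem _ hp, h1, h2⟩
    · rintro (h | ⟨p, hp, h1, h2⟩)
      · exact Or.inl (Or.inl h)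
      · rcases List.mem_cons.mp hp with rfl | hp'
        · exact Or.inl (Or.inr ⟨h1.symm, h2⟩)
        · exact Or.inr ⟨p, hp', h1, h2⟩

-- the index's variant lists stay duplicate-free
theorem idx_inner_nodup (var : String) (ms : List (List (String × String))) :
    ∀ (idx : PySem.Dict (List (String × String)) (List String)),
      (∀ s, (idx.getD s []).Nodup) → ∀ s, ((ms.foldl (pvIdxAdd var) idx).getD s []).Nodup := by
  induction ms with
  | nil => intro idx h s; exact h s
  | cons m ms ih =>
    intro idx h s
    rw [List.foldl_cons]
    refine ih _ (fun s' => ?_) s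
    show ((idx.modify (mutSigB m) [] _).getD s' []).Nodup
    rw [PySem.Dict.getD_modify]
    by_cases hs : s' = mutSigB m
    · rw [if_pos hs]
      by_cases hc : (idx.getD (mutSigB m) []).contains var = true
      · rw [if_pos hc]; exact h _
      · rw [if_neg hc]
        simp only [List.contains_iff_mem] at hc
        simp [List.nodup_append, h (mutSigB m)]
        exact fun a ha hav => hc (hav ▸ ha)
    · rw [if_neg hs]; exact h s'

theorem idx_outer_nodup (L : List (String × List (List (String × String)))) :
    ∀ (idx : PySem.Dict (List (String × String)) (List String)),
      (∀ s, (idx.getD s []).Nodup) →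
      ∀ s, ((L.foldl (fun idx p => p.2.foldl (pvIdxAdd p.1) idx) idx).getD s []).Nodup := by
  induction L with
  | nil => intro idx h s; exact h s
  | cons q L ih =>
    intro idx h s
    rw [List.foldl_cons]
    exact ih _ (idx_inner_nodup q.1 q.2 idx h) s

-- Set.update by elements already present is the identity
theorem set_update_of_subset {α : Type} [BEq α] [LawfulBEq α] (xs : List α) :
    ∀ (s : PySem.Set α), (∀ x ∈ xs, x ∈ s) → PySem.Set.update s xs = s := by
  induction xs with
  | nil => intro s _; rfl
  | cons x xs ih =>
    intro s h
    show PySem.Set.update (PySem.Set.add s x) xs = s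
    have hx : PySem.Set.add s x = s := by
      unfold PySem.Set.add
      rw [if_pos]
      simp only [PySem.Set.contains, List.contains_iff_mem]
      exact h x List.mem_cons_self
    rw [hx]
    exact ih s (fun y hy => h y (List.mem_cons_of_mem _ hy))

theorem classify_eq_aux (pm : List (List (String × String)))
    (vp : List (String × List (List (String × String)))) (thr : Int)
    (hpm : ¬ pm = []) (hvp : vp ≠ []) :
    classify_variant pm vp thr = classify_variant_alt pm vp thr := by
  unfold classify_variant classify_variant_alt
  rw [if_neg hpm, if_neg hpm, if_neg hvp]
  simp only []
  set L := (PySem.Dict.ofList vp).items with hLdef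
  -- keys of the dict are the distinct variant names
  have hkeys : (PySem.Dict.ofList vp).keys = PySem.Set.ofList (vp.map Prod.fst) := by
    have h := PySem.Dict.keys_foldl_insert_key (ν := List (List (String × String))) vp Prod.fst
      (fun _ x => x.2) PySem.Dict.empty
    exact h.trans (PySem.Set.update_nil_left _)
  have hnodupL : (L.map (fun p => p.1)).Nodup := by
    have h : L.map (fun p => p.1) = (PySem.Dict.ofList vp).keys := rfl
    rw [h, hkeys]
    exact PySem.Set.nodup_ofList _
  have hLne : L ≠ [] := by
    obtain ⟨v, vs, rfl⟩ := List.exists_cons_of_ne_nil hvp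
    intro hnil
    have hv : v.1 ∈ (PySem.Dict.ofList (v :: vs)).keys := by
      rw [hkeys, PySem.Set.mem_ofList]
      exact List.mem_map_of_mem List.mem_cons_self
    have h : (PySem.Dict.ofList (v :: vs)).keys = L.map (fun p => p.1) := rfl
    rw [h, hnil] at hv
    cases hv
  -- A's dict comprehension, as a list
  have hitems : (L.foldl (fun d p => d.insert p.1 (count_matching_mutations pm p.2)) PySem.Dict.empty).items
      = L.map (fun p => (p.1, count_matching_mutations pm p.2)) := by
    have h := PySem.Dict.items_foldl_insert_fresh L (fun p => p.1)
      (fun p => count_matching_mutations pm p.2) PySem.Dict.empty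
      (fun p _ => PySem.Dict.contains_empty _) hnodupL
    simpa using h
  set S := L.map (fun p => (p.1, count_matching_mutations pm p.2)) with hSdef
  have hSne : S ≠ [] := fun h => hLne (List.map_eq_nil_iff.mp h)
  have hnodupS : (S.map Prod.fst).Nodup := by
    rw [hSdef, List.map_map]
    simpa using hnodupL
  have hpos : ∀ q ∈ S, 0 ≤ q.2 := by
    intro q hq
    obtain ⟨p, hp, rfl⟩ := List.mem_map.mp hq
    exact Int.natCast_nonneg _
  set M := pvMx S (-1) with hMdef
  have hM1 : -1 < M := by
    obtain ⟨q0, T0, hST⟩ := List.exists_cons_of_ne_nil hSne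
    have h0 : 0 ≤ q0.2 := hpos q0 (hST ▸ List.mem_cons_self)
    have h1 : q0.2 ≤ M := pvMx_ge_mem S q0 (hST ▸ List.mem_cons_self) (-1)
    omega
  have hM_is : ∃ q ∈ S, q.2 = M := by
    rcases pvMx_mem S (-1) with h | h
    · rw [hMdef] at hM1; omega
    · exact h
  -- ===== B's pipeline =====
  set idx := L.foldl (fun idx p => p.2.foldl (pvIdxAdd p.1) idx) PySem.Dict.empty with hidxdef
  have hIdx : ∀ s v, v ∈ idx.getD s [] ↔ ∃ p ∈ L, p.1 = v ∧ s ∈ p.2.map mutSigB := by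
    intro s v
    rw [hidxdef, idx_outer]
    simp [PySem.Dict.getD_empty]
  have hIdxNodup : ∀ s, (idx.getD s []).Nodup := by
    intro s
    rw [hidxdef]
    exact idx_outer_nodup L PySem.Dict.empty (fun s' => by simp [PySem.Dict.getD_empty]) s
  set counts0 := L.foldl (fun d p => d.insert p.1 (0 : Int)) PySem.Dict.empty with hc0def
  have hc0items : counts0.items = L.map (fun p => (p.1, (0 : Int))) := by
    have h := PySem.Dict.items_foldl_insert_fresh L (fun p => p.1) (fun _ => (0 : Int))
      PySem.Dict.empty (fun p _ => PySem.Dict.contains_empty _) hnodupL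
    simpa using h
  have hc0keys : counts0.keys = L.map (fun p => p.1) := by
    show counts0.items.map (fun p => p.1) = _
    rw [hc0items, List.map_map]
    rfl
  set F := (PySem.Set.ofList (pm.map mutSigB)).flatMap (fun s => idx.getD s []) with hFdef
  have hflat : (PySem.Set.ofList (pm.map mutSigB)).foldl
      (fun d s => (idx.getD s []).foldl (fun d v => d.modify v 0 (· + 1)) d) counts0
      = F.foldl (fun d v => d.modify v 0 (· + 1)) counts0 := by
    rw [hFdef, List.foldl_flatMap]
  set counts := F.foldl (fun d v => d.modify v 0 (· + 1)) counts0 with hcdef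
  have hFsub : ∀ x ∈ F, x ∈ counts0.keys := by
    intro x hx
    rw [hFdef] at hx
    obtain ⟨s, _, hmem⟩ := List.mem_flatMap.mp hx
    obtain ⟨p, hp, h1, _⟩ := (hIdx s x).mp hmem
    rw [hc0keys]
    exact h1 ▸ List.mem_map_of_mem hp
  have hckeys : counts.keys = L.map (fun p => p.1) := by
    rw [hcdef]
    have h := PySem.Dict.keys_foldl_modify F (0 : Int) (fun _ _ => (· + 1)) counts0
    rw [h, set_update_of_subset F counts0.keys hFsub, hc0keys]
  have hgetD : ∀ v, counts.getD v 0 = counts0.getD v 0 + (F.count v : Int) := by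
    intro v
    rw [hcdef]
    exact PySem.Dict.getD_foldl_modify_add_one F counts0 v
  -- per-variant score: the counter equals A's intersection size
  have hscore : ∀ p ∈ L, counts.getD p.1 0 = count_matching_mutations pm p.2 := by
    intro p hp
    have hc0 : counts0.getD p.1 0 = 0 := by
      refine PySem.Dict.getD_of_mem_items counts0 ?_ (hc0keys ▸ hnodupL) 0
      rw [hc0items]
      exact List.mem_map_of_mem hp
    have hcount : ∀ s, (idx.getD s []).count p.1 = if s ∈ p.2.map mutSigB then 1 else 0 := by
      intro s
      by_cases hs : s ∈ p.2.map mutSigB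
      · rw [if_pos hs]
        exact List.count_eq_one_of_mem (hIdxNodup s) ((hIdx s p.1).mpr ⟨p, hp, rfl, hs⟩)
      · rw [if_neg hs]
        refine List.count_eq_zero.mpr (fun hmem => ?_)
        obtain ⟨q, hq, h1, h2⟩ := (hIdx s p.1).mp hmem
        have : q = p := List.inj_on_of_nodup_map hnodupL hq hp h1
        exact hs (this ▸ h2)
    have hFc : F.count p.1 = (PySem.Set.ofList (pm.map mutSigB)).countP
        (fun s => decide (s ∈ p.2.map mutSigB)) := by
      rw [hFdef, List.count_flatMap]
      have h1 : (PySem.Set.ofList (pm.map mutSigB)).map (List.count p.1 ∘ fun s => idx.getD s [])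
          = (PySem.Set.ofList (pm.map mutSigB)).map (fun s => if s ∈ p.2.map mutSigB then 1 else 0) :=
        List.map_congr_left (fun s _ => hcount s)
      rw [h1]
      exact PySem.List.sum_map_ite_one_zero_nat' _ _
    have hA : count_matching_mutations pm p.2 =
        ((PySem.Set.ofList (pm.map mutSigB)).countP (fun s => decide (s ∈ p.2.map mutSigB)) : Int) := by
      show ((List.filter (fun x => PySem.Set.contains (PySem.Set.ofList (p.2.map mutSigB)) x) (PySem.Set.ofList (pm.map mutSigB))).length : Int) = _
      rw [← List.countP_eq_length_filter]
      congr 1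
      refine List.countP_congr (fun s _ => ?_)
      simp [PySem.Set.contains, PySem.Set.mem_ofList]
    rw [hgetD, hc0, hFc, hA]
    simp
  have hitemsC : counts.items = S := by
    have hnd : counts.keys.Nodup := hckeys ▸ hnodupL
    rw [PySem.Dict.items_eq_map_keys counts hnd 0, hckeys, List.map_map, hSdef]
    exact List.map_congr_left (fun p hp => by simp [Function.comp, hscore p hp])
  -- B's selection fold over counts.items = S
  have hBfold : counts.items.foldl
      (fun (acc : Int × List String) q =>
        if acc.1 < q.2 then (q.2, [q.1])
        else if q.2 = acc.1 then (acc.1, acc.2 ++ [q.1]) else acc) (-1, [])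
      = (M, (S.filter (fun q => decide (q.2 = M))).map (fun q => q.1)) := by
    rw [hitemsC]
    refine Prod.ext ?_ ?_
    · rw [fold_fst S (-1) []]
    · rw [fold_snd S (-1) [], ← hMdef, if_neg (by omega)]
      simp
  -- ===== A's selection, matched against B's =====
  rw [hflat, hBfold]
  simp only [PySem.Dict.keys, PySem.Dict.getD, PySem.Dict.get?]
  rw [hitems]
  obtain ⟨bv, hbv⟩ : ∃ bv, (PySem.List.max? (List.map (fun x => x.1) S) fun k =>
      (Option.map (fun x => x.2) (List.find? (fun p => p.1 == k) S)).getD 0) = some bv := by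
    cases h : PySem.List.max? (List.map (fun x => x.1) S) fun k =>
        (Option.map (fun x => x.2) (List.find? (fun p => p.1 == k) S)).getD 0 with
    | none => exact absurd (List.map_eq_nil_iff.mp ((PySem.List.max?_eq_none_iff _ _).mp h)) hSne
    | some bv => exact ⟨bv, rfl⟩
  rw [hbv]
  simp only []
  have hlk : ∀ k, (Option.map (fun x => x.2) (List.find? (fun p => p.1 == k) S)).getD 0 = pvLookup S k :=
    fun _ => rfl
  simp only [hlk]
  have hmem : bv ∈ List.map (fun x => x.1) S := PySem.List.max?_mem hbv
  obtain ⟨pb, hpb, hpb1⟩ := List.mem_map.mp hmem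
  have hIsMax : ∀ y ∈ List.map (fun x => x.1) S, pvLookup S y ≤ pvLookup S bv :=
    PySem.List.max?_isMax hbv
  have hpbv : pvLookup S bv = pb.2 := by rw [← hpb1]; exact pvLookup_eq S hnodupS pb hpb
  have hlbv : pvLookup S bv = M := by
    have h2 : pb.2 ≤ M := pvMx_ge_mem S pb hpb (-1)
    obtain ⟨q, hq, hqM⟩ := hM_is
    have h3 : pvLookup S q.1 ≤ pvLookup S bv := hIsMax q.1 (List.mem_map_of_mem hq)
    rw [pvLookup_eq S hnodupS q hq] at h3
    omega
  simp only [hlbv]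
  have hfilt : (List.filter (fun p => p.2 == M) S) = (List.filter (fun q => decide (q.2 = M)) S) := by
    congr 1
  rw [hfilt]
  have hbvties : bv ∈ List.map (fun q => q.1) (List.filter (fun q => decide (q.2 = M)) S) := by
    refine List.mem_map.mpr ⟨pb, List.mem_filter.mpr ⟨hpb, ?_⟩, hpb1⟩
    have hpbM : pb.2 = M := by omega
    simp [hpbM]
  cases hties : List.map (fun q => q.1) (List.filter (fun q => decide (q.2 = M)) S) with
  | nil => rw [hties] at hbvties; cases hbvties
  | cons t0 trest =>
    by_cases hthr : M < thr
    · simp only [if_pos hthr]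
    · simp only [if_neg hthr]
      by_cases htie : (1 : Int) < ((t0 :: trest).length : Int)
      · simp only [if_pos htie]
      · simp only [if_neg htie]
        have hrest : trest = [] := by
          cases trest with
          | nil => rfl
          | cons a b => exfalso; apply htie; simp
        subst hrest
        rw [hties] at hbvties
        have hbt : bv = t0 := by simpa using hbvties
        simp [hbt]

-- ===== VERDICT (by name: the statement is the Claim_ definition above) =====
theorem classify_variant_spec : Claim_equal_classify_variant := by
  intro pm vp thr _ hpre
  unfold Spec_classify_variant
  by_cases hpm : pm = []
  · simp [classify_variant, classify_variant_alt, hpm]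
  · have hvp : vp ≠ [] := by
      rcases hpre with h | h
      · exact absurd h hpm
      · exact h
    exact classify_eq_aux pm vp thr hpm hvp
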